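-- pv_equiv track=rewrite | github.com/jay323p/lottery_python | numbers_game.py | didMatchLastThreeAny
-- ===== SOURCE A (Python) =====
-- def didMatchLastThreeAny(numsChosen, winNums):
--     usr_freq = {}
--     win_freq = {}
--     for i in range(1, 4):
--         if (numsChosen[i] in usr_freq):
--             usr_freq[numsChosen[i]] += 1
--         else:
--             usr_freq[numsChosen[i]] = 1
--
--     for i in range(1, 4):
--         if (winNums[i] in win_freq):
--             win_freq[winNums[i]] += 1
--         else:
--             win_freq[winNums[i]] = 1
--     return usr_freq == win_freq
-- ===== SOURCE B (Python) =====
-- def didMatchLastThreeAny(numsChosen, winNums):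
--     chosen = [numsChosen[1], numsChosen[2], numsChosen[3]]
--     win = [winNums[1], winNums[2], winNums[3]]
--     return sorted(chosen) == sorted(win)
-- ===== Notes on version B (the rewrite author's own statement) =====
-- stated objective: simpler
-- what changed: Replaces the two hand-built frequency dictionaries and dict comparison with extracting the three elements by index and comparing the sorted 3-element lists.
import Mathlib
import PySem

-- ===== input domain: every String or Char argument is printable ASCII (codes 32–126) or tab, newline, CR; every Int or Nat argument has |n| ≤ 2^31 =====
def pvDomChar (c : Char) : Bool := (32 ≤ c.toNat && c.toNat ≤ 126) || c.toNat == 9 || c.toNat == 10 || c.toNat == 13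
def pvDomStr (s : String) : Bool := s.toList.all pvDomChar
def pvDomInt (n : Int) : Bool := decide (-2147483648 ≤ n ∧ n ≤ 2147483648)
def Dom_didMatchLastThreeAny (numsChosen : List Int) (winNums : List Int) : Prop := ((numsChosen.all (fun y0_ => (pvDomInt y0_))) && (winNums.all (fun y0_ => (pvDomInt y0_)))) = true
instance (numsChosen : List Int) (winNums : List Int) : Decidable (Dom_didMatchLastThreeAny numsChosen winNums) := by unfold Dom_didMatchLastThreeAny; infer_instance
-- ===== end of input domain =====

-- B replaces the two frequency dictionaries with a sort-then-compare of the three indexed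
-- elements (simpler); return-value equivalence is proved on all inputs where A returns.

-- ===== PORT A =====
-- one loop iteration's body: 'if x in d: d[x] += 1 else: d[x] = 1'
def pvStep (d : PySem.Dict Int Int) (x : Int) : PySem.Dict Int Int :=
  if d.contains x then d.insert x (d.getD x 0 + 1) else d.insert x 1

-- 'for i in range(1, 4): …' building the frequency dict (pyGet? = none is Python's
-- IndexError, excluded by Pre_; the fold skips it to stay total)
def pvFreq (xs : List Int) : PySem.Dict Int Int :=
  (PySem.List.pyRange 1 4 1).foldl
    (fun d i =>
      match PySem.List.pyGet? xs i with
      | some x => pvStep d x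
      | none => d)
    PySem.Dict.empty

-- Python's dict == (order-insensitive): same keys, same values
def pvDictEq (d e : PySem.Dict Int Int) : Bool :=
  (d.keys.all (fun k => e.get? k == d.get? k)) && (e.keys.all (fun k => d.get? k == e.get? k))

def didMatchLastThreeAny (numsChosen : List Int) (winNums : List Int) : Bool :=
  pvDictEq (pvFreq numsChosen) (pvFreq winNums)

-- ===== PORT B =====
def didMatchLastThreeAny_alt (numsChosen : List Int) (winNums : List Int) : Bool :=
  match PySem.List.pyGet? numsChosen 1, PySem.List.pyGet? numsChosen 2, PySem.List.pyGet? numsChosen 3,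
        PySem.List.pyGet? winNums 1, PySem.List.pyGet? winNums 2, PySem.List.pyGet? winNums 3 with
  | some a, some b, some c, some d, some e, some f =>
      PySem.List.sorted [a, b, c] (fun x => x) false == PySem.List.sorted [d, e, f] (fun x => x) false
  | _, _, _, _, _, _ => false

-- ===== PRECONDITION & SPEC =====
-- Pre_ excludes exactly the inputs where A raises IndexError (a list shorter than 4).
def Pre_didMatchLastThreeAny (numsChosen : List Int) (winNums : List Int) : Prop :=
  4 ≤ numsChosen.length ∧ 4 ≤ winNums.length
instance (numsChosen : List Int) (winNums : List Int) : Decidable (Pre_didMatchLastThreeAny numsChosen winNums) := by unfold Pre_didMatchLastThreeAny; infer_instance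

def pvWitness_didMatchLastThreeAny : List Int × List Int := ([9, 1, 2, 3], [0, 3, 1, 2])

def Spec_didMatchLastThreeAny (numsChosen : List Int) (winNums : List Int) (out : Bool) : Prop := out = didMatchLastThreeAny_alt numsChosen winNums
instance (numsChosen : List Int) (winNums : List Int) (out : Bool) : Decidable (Spec_didMatchLastThreeAny numsChosen winNums out) := by unfold Spec_didMatchLastThreeAny; infer_instance

-- ===== CLAIM (what is proved, stated in full; the proofs are below) =====
def Claim_equal_didMatchLastThreeAny : Prop := ∀ (numsChosen : List Int) (winNums : List Int), Dom_didMatchLastThreeAny numsChosen winNums → Pre_didMatchLastThreeAny numsChosen winNums → Spec_didMatchLastThreeAny numsChosen winNums (didMatchLastThreeAny numsChosen winNums)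

-- ===== LEMMAS AND PROOFS =====

theorem pvStep_eq (d : PySem.Dict Int Int) (x : Int) :
    pvStep d x = d.insert x (d.getD x 0 + 1) := by
  unfold pvStep
  split_ifs with h
  · rfl
  · rw [PySem.Dict.getD_of_not_contains (h := by simpa using h)]
    norm_num

theorem pvFreq_eq_counter (xs : List Int) (a b c : Int)
    (h1 : PySem.List.pyGet? xs 1 = some a)
    (h2 : PySem.List.pyGet? xs 2 = some b)
    (h3 : PySem.List.pyGet? xs 3 = some c) :
    pvFreq xs = PySem.Dict.counter [a, b, c] := by
  have hr : PySem.List.pyRange 1 4 1 = [1, 2, 3] := by decide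
  rw [← PySem.Dict.foldl_insert_getD_add_one_eq_counter]
  unfold pvFreq
  rw [hr]
  simp [List.foldl, h1, h2, h3, pvStep_eq]

theorem get?_counter (xs : List Int) (k : Int) :
    (PySem.Dict.counter xs).get? k = if k ∈ xs then some ((xs.count k : Int)) else none := by
  by_cases h : k ∈ xs
  · have hc : (PySem.Dict.counter xs).contains k = true := by
      rw [PySem.Dict.contains_iff_mem_keys, PySem.Dict.keys_counter]
      exact (PySem.Set.mem_ofList _ _).mpr h
    cases hg : (PySem.Dict.counter xs).get? k with
    | none =>
        rw [PySem.Dict.get?_eq_none_iff_contains] at hg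
        simp [hc] at hg
    | some v =>
        have hd := PySem.Dict.getD_counter (xs := xs) (v := k)
        rw [PySem.Dict.getD_eq_get?_getD, hg] at hd
        simp at hd
        simp [h, hd]
  · have hc : (PySem.Dict.counter xs).contains k = false := by
      rw [← Bool.not_eq_true, PySem.Dict.contains_iff_mem_keys, PySem.Dict.keys_counter]
      simpa [PySem.Set.mem_ofList] using h
    have hn : (PySem.Dict.counter xs).get? k = none := by
      rw [PySem.Dict.get?_eq_none_iff_contains]; exact hc
    simp [hn, h]

theorem dictEq_counter_iff (xs ys : List Int) :
    pvDictEq (PySem.Dict.counter xs) (PySem.Dict.counter ys) = true ↔ xs.Perm ys := by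
  constructor
  · intro h
    simp only [pvDictEq, Bool.and_eq_true, List.all_eq_true] at h
    obtain ⟨h1, h2⟩ := h
    rw [List.perm_iff_count]
    intro v
    by_cases hx : v ∈ xs
    · have hk : v ∈ (PySem.Dict.counter xs).keys := by
        rw [PySem.Dict.keys_counter]; exact (PySem.Set.mem_ofList _ _).mpr hx
      have := h1 v hk
      rw [get?_counter, get?_counter] at this
      by_cases hy : v ∈ ys
      · simp [hx, hy] at this; omega
      · simp [hx, hy] at this
    · by_cases hy : v ∈ ys
      · have hk : v ∈ (PySem.Dict.counter ys).keys := by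
          rw [PySem.Dict.keys_counter]; exact (PySem.Set.mem_ofList _ _).mpr hy
        have := h2 v hk
        rw [get?_counter, get?_counter] at this
        simp [hx, hy] at this
      · simp [List.count_eq_zero_of_not_mem hx, List.count_eq_zero_of_not_mem hy]
  · intro hp
    have hcount := List.perm_iff_count.mp hp
    simp only [pvDictEq, Bool.and_eq_true, List.all_eq_true]
    constructor
    · intro k _
      rw [get?_counter, get?_counter]
      by_cases h : k ∈ xs
      · simp [h, hp.mem_iff.mp h, hcount k]
      · have hy : k ∉ ys := fun hy => h (hp.mem_iff.mpr hy)
        simp [h, hy]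
    · intro k _
      rw [get?_counter, get?_counter]
      by_cases h : k ∈ xs
      · simp [h, hp.mem_iff.mp h, hcount k]
      · have hy : k ∉ ys := fun hy => h (hp.mem_iff.mpr hy)
        simp [h, hy]

-- ===== VERDICT (by name: the statement is the Claim_ definition above) =====
theorem didMatchLastThreeAny_spec : Claim_equal_didMatchLastThreeAny := by
  intro xs ys _ hpre
  obtain ⟨hx, hy⟩ := hpre
  unfold Spec_didMatchLastThreeAny
  have h1 : PySem.List.pyGet? xs 1 = some (xs[1]'(by omega)) := by simpa using PySem.List.pyGet?_ofNat xs 1 (by omega)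
  have h2 : PySem.List.pyGet? xs 2 = some (xs[2]'(by omega)) := by simpa using PySem.List.pyGet?_ofNat xs 2 (by omega)
  have h3 : PySem.List.pyGet? xs 3 = some (xs[3]'(by omega)) := by simpa using PySem.List.pyGet?_ofNat xs 3 (by omega)
  have h4 : PySem.List.pyGet? ys 1 = some (ys[1]'(by omega)) := by simpa using PySem.List.pyGet?_ofNat ys 1 (by omega)
  have h5 : PySem.List.pyGet? ys 2 = some (ys[2]'(by omega)) := by simpa using PySem.List.pyGet?_ofNat ys 2 (by omega)
  have h6 : PySem.List.pyGet? ys 3 = some (ys[3]'(by omega)) := by simpa using PySem.List.pyGet?_ofNat ys 3 (by omega)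
  unfold didMatchLastThreeAny didMatchLastThreeAny_alt
  rw [pvFreq_eq_counter xs _ _ _ h1 h2 h3, pvFreq_eq_counter ys _ _ _ h4 h5 h6,
      h1, h2, h3, h4, h5, h6]
  have hbb : ∀ (p q : Bool), (p = true ↔ q = true) → p = q := by decide
  apply hbb
  rw [dictEq_counter_iff, beq_iff_eq, PySem.List.sorted_id_eq_sorted_id_iff_perm]
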